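-- pv_equiv track=rewrite | github.com/lea-urpa/exome_qc_library | shared/utils.py | get_upper_triangle
-- ===== SOURCE A (Python) =====
-- def get_upper_triangle(list):
--     """
--     Given a list of items, returns a list where each element is the upper triangle of a pairwise comparison between
--     the items in the list.
--     :param file_list:
--     :return: Returns list of pairs, lenth n choose 2 (where n is length of file list)
--     """
--     # Get upper triangle of pairwise comparisons
--     uppertri = []
--     pairs = [[x, y] for i, x in enumerate(list) for j, y in enumerate(list) if i != j]  # upper and lower
--     for pair in pairs:  # remove duplicates/lower
--         pair.sort()
--         if pair not in uppertri:
--             uppertri.append(pair)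
--
--     return uppertri
-- ===== SOURCE B (Python) =====
-- def get_upper_triangle(list):
--     uppertri = []
--     seen = set()
--     rest = list
--     while rest:
--         x = rest[0]
--         rest = rest[1:]
--         for y in rest:
--             a, b = (x, y) if x <= y else (y, x)
--             if (a, b) not in seen:
--                 seen.add((a, b))
--                 uppertri.append([a, b])
--     return uppertri
-- ===== Notes on version B (the rewrite author's own statement) =====
-- stated objective: faster
-- what changed: B makes a single i<j pass over the list, sorting each pair in O(1) and deduplicating via a seen-set of tuples, instead of materialising all n(n-1) ordered pairs and scanning the output list for membership on each pair.
import Mathlib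
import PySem

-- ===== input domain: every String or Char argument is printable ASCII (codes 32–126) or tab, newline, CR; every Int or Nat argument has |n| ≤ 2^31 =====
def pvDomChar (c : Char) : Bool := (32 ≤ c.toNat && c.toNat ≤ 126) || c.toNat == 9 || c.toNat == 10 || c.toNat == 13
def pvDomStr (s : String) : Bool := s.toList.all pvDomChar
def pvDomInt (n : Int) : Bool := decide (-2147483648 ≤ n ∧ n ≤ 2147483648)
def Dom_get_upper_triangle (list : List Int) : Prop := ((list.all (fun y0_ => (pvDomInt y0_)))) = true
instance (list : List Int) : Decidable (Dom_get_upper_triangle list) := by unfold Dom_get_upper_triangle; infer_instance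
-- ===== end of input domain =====

-- B replaces A's materialised n(n-1) ordered-pair list and list-membership dedup by a single i<j pass with a seen-set; equivalence of the return values is proved below (a timing run measured B faster).


-- ===== PORT A =====
def get_upper_triangle (list : List Int) : List (List Int) :=
  -- pairs = [[x, y] for i, x in enumerate(list) for j, y in enumerate(list) if i != j]
  let pairs : List (List Int) :=
    (PySem.List.enumerate list 0).flatMap (fun ix =>
      (PySem.List.enumerate list 0).flatMap (fun jy =>
        if ix.1 ≠ jy.1 then [[ix.2, jy.2]] else []))
  -- for pair in pairs: pair.sort(); if pair not in uppertri: uppertri.append(pair)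
  pairs.foldl (fun uppertri pair =>
    let p := PySem.List.sorted pair (fun v => v) false
    if p ∈ uppertri then uppertri else uppertri ++ [p]) []

-- ===== PORT B =====
-- body of Source B's inner 'for y in rest' loop
def pvAltStep (x : Int) (st : List (List Int) × PySem.Set (Int × Int)) (y : Int) :
    List (List Int) × PySem.Set (Int × Int) :=
  let a := if x ≤ y then x else y
  let b := if x ≤ y then y else x
  if PySem.Set.contains st.2 (a, b) then st
  else (st.1 ++ [[a, b]], PySem.Set.add st.2 (a, b))

-- the inner 'for y in rest' loop
def pvAltInner (x : Int) (rest : List Int)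
    (st : List (List Int) × PySem.Set (Int × Int)) :
    List (List Int) × PySem.Set (Int × Int) :=
  rest.foldl (pvAltStep x) st

-- the outer 'while rest' loop (x = rest[0]; rest = rest[1:])
def pvAltLoop : List Int → (List (List Int) × PySem.Set (Int × Int)) →
    List (List Int) × PySem.Set (Int × Int)
  | [], st => st
  | x :: rest, st => pvAltLoop rest (pvAltInner x rest st)

def get_upper_triangle_alt (list : List Int) : List (List Int) :=
  (pvAltLoop list ([], PySem.Set.empty)).1

-- ===== PRECONDITION & SPEC =====
def Spec_get_upper_triangle (list : List Int) (out : List (List Int)) : Prop := out = get_upper_triangle_alt list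
instance (list : List Int) (out : List (List Int)) : Decidable (Spec_get_upper_triangle list out) := by unfold Spec_get_upper_triangle; infer_instance

-- ===== CLAIM (what is proved, stated in full; the proofs are below) =====
def Claim_equal_get_upper_triangle : Prop := ∀ (list : List Int), Dom_get_upper_triangle list → Spec_get_upper_triangle list (get_upper_triangle list)

-- ===== LEMMAS AND PROOFS =====

-- the sorted two-element pair
def pvSp (x y : Int) : List Int := if x ≤ y then [x, y] else [y, x]

-- A's dedup step and its fold
def pvStep (acc : List (List Int)) (p : List Int) : List (List Int) :=
  if p ∈ acc then acc else acc ++ [p]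

def pvDedup (acc : List (List Int)) (l : List (List Int)) : List (List Int) :=
  l.foldl pvStep acc

-- A's nested comprehension, over an arbitrary enumerated list
def pvPairsGen (el : List (Int × Int)) : List (List Int) :=
  el.flatMap (fun ix => el.flatMap (fun jy =>
    if ix.1 ≠ jy.1 then [[ix.2, jy.2]] else []))

-- B's loop invariant: the seen-set holds exactly the pairs already in the output
def pvInv (st : List (List Int) × PySem.Set (Int × Int)) : Prop :=
  ∀ p : Int × Int, p ∈ st.2 ↔ [p.1, p.2] ∈ st.1

lemma pvSorted_pair (x y : Int) :
    PySem.List.sorted [x, y] (fun v => v) false = pvSp x y := by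
  unfold pvSp
  by_cases h : x ≤ y
  · rw [if_pos h]
    exact PySem.List.sorted_eq_self_of_pairwise _ _ (by simp [List.pairwise_cons, h])
  · rw [if_neg h]
    exact PySem.List.sorted_id_eq_of_perm_of_pairwise _ _ (List.Perm.swap x y [])
      (by simp [List.pairwise_cons]; omega)

lemma pvSp_comm (x y : Int) : pvSp x y = pvSp y x := by
  unfold pvSp; split_ifs with h1 h2 h2 <;> first | rfl | (simp_all; omega)

lemma pvMem_dedup_of_mem_acc {p : List Int} {acc : List (List Int)}
    (l : List (List Int)) (h : p ∈ acc) : p ∈ pvDedup acc l := by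
  induction l generalizing acc with
  | nil => exact h
  | cons q l ih =>
    show p ∈ pvDedup (pvStep acc q) l
    apply ih; unfold pvStep; split <;> simp [h]

lemma pvMem_dedup_of_mem {p : List Int} {l : List (List Int)}
    (acc : List (List Int)) (h : p ∈ l) : p ∈ pvDedup acc l := by
  induction l generalizing acc with
  | nil => simp at h
  | cons q l ih =>
    show p ∈ pvDedup (pvStep acc q) l
    rcases List.mem_cons.mp h with rfl | h
    · apply pvMem_dedup_of_mem_acc; unfold pvStep; split <;> simp_all
    · exact ih _ h

lemma pvDedup_append (acc : List (List Int)) (l1 l2 : List (List Int)) :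
    pvDedup acc (l1 ++ l2) = pvDedup (pvDedup acc l1) l2 :=
  List.foldl_append

lemma pvDedup_cons_mem {p : List Int} {acc : List (List Int)}
    (l : List (List Int)) (h : p ∈ acc) :
    pvDedup acc (p :: l) = pvDedup acc l := by
  show pvDedup (pvStep acc p) l = _
  unfold pvStep; simp [h]

-- elements already present in acc can be dropped from the heads of a flatMap
lemma pvDedup_skip {γ : Type} (el : List γ) (hd : γ → List Int)
    (g : γ → List (List Int)) (acc : List (List Int))
    (h : ∀ e ∈ el, hd e ∈ acc) :
    pvDedup acc (el.flatMap (fun e => hd e :: g e)) =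
      pvDedup acc (el.flatMap g) := by
  induction el generalizing acc with
  | nil => rfl
  | cons e el ih =>
    simp only [List.flatMap_cons]
    rw [show hd e :: g e ++ el.flatMap (fun e => hd e :: g e) =
          hd e :: (g e ++ el.flatMap (fun e => hd e :: g e)) from rfl]
    rw [pvDedup_cons_mem _ (h e (by simp))]
    rw [pvDedup_append, pvDedup_append]
    exact ih _ (fun e' he' => pvMem_dedup_of_mem_acc _ (h e' (by simp [he'])))

lemma pvFlatMap_if_ne (s : Int) (x : Int) (el : List (Int × Int))
    (h : ∀ p ∈ el, p.1 ≠ s) :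
    el.flatMap (fun jy => if s ≠ jy.1 then [[x, jy.2]] else []) =
      el.map (fun jy => [x, jy.2]) := by
  induction el with
  | nil => rfl
  | cons p el ih =>
    simp only [List.flatMap_cons, List.map_cons]
    rw [if_pos (Ne.symm (h p (by simp))), ih (fun q hq => h q (by simp [hq]))]
    rfl

lemma pvEnum_fst_ne (t : List Int) (s : Int) :
    ∀ p ∈ PySem.List.enumerate t (s + 1), p.1 ≠ s := by
  intro p hp
  rcases (PySem.List.mem_enumerate_iff _ _ _).mp hp with ⟨k, hk, rfl⟩
  simp; omega

-- decomposition of A's pair list at a cons: the head's row, then each later row led by its pair with the head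
lemma pvPairsGen_cons (x : Int) (t : List Int) (s : Int) :
    pvPairsGen (PySem.List.enumerate (x :: t) s) =
      (PySem.List.enumerate t (s + 1)).map (fun jy => [x, jy.2]) ++
      (PySem.List.enumerate t (s + 1)).flatMap (fun ix =>
        [ix.2, x] :: (PySem.List.enumerate t (s + 1)).flatMap (fun jy =>
          if ix.1 ≠ jy.1 then [[ix.2, jy.2]] else [])) := by
  have hne := pvEnum_fst_ne t s
  unfold pvPairsGen
  rw [PySem.List.enumerate_cons]
  simp only [List.flatMap_cons]
  congr 1
  · rw [if_neg (by simp), List.nil_append]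
    exact pvFlatMap_if_ne s x _ hne
  · apply List.flatMap_congr
    intro ix hix
    rw [if_pos (by exact fun h => hne ix hix (by simp [h]))]
    rfl

lemma pvAltStep_spec (x y : Int) (st : List (List Int) × PySem.Set (Int × Int))
    (hinv : pvInv st) :
    (pvAltStep x st y).1 = pvStep st.1 (pvSp x y) ∧ pvInv (pvAltStep x st y) := by
  have hkey : pvSp x y = [(if x ≤ y then x else y), (if x ≤ y then y else x)] := by
    unfold pvSp; by_cases h : x ≤ y <;> simp [h]
  unfold pvAltStep pvStep
  by_cases hm : pvSp x y ∈ st.1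
  · have hc : PySem.Set.contains st.2 (if x ≤ y then x else y, if x ≤ y then y else x) = true := by
      rw [PySem.Set.contains_iff]
      exact (hinv _).mpr (by rw [← hkey]; exact hm)
    rw [if_pos hc, if_pos hm]
    exact ⟨rfl, hinv⟩
  · have hc : ¬ PySem.Set.contains st.2 (if x ≤ y then x else y, if x ≤ y then y else x) = true := by
      rw [PySem.Set.contains_iff]
      intro hmem
      exact hm (by rw [hkey]; exact (hinv _).mp hmem)
    rw [if_neg hc, if_neg hm]
    refine ⟨by rw [hkey], ?_⟩
    intro p
    rw [PySem.Set.mem_add]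
    constructor
    · rintro (hs | he)
      · exact List.mem_append_left _ ((hinv p).mp hs)
      · apply List.mem_append_right; rw [he]; simp
    · intro hp
      rcases List.mem_append.mp hp with hl | hr
      · exact Or.inl ((hinv p).mpr hl)
      · right
        have h12 : p.1 = (if x ≤ y then x else y) ∧ p.2 = (if x ≤ y then y else x) := by
          simpa using hr
        exact Prod.ext h12.1 h12.2

-- B's inner loop is A's dedup fold over the sorted-pair row, and keeps the invariant
lemma pvAltInner_spec (x : Int) (t : List Int)
    (st : List (List Int) × PySem.Set (Int × Int)) (hinv : pvInv st) :
    (pvAltInner x t st).1 = pvDedup st.1 (t.map (pvSp x)) ∧ pvInv (pvAltInner x t st) := by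
  induction t generalizing st with
  | nil => exact ⟨rfl, hinv⟩
  | cons y t ih =>
    have h := pvAltStep_spec x y st hinv
    have := ih (pvAltStep x st y) h.2
    constructor
    · show (pvAltInner x t (pvAltStep x st y)).1 = pvDedup st.1 ((pvSp x y) :: t.map (pvSp x))
      rw [this.1, h.1]
      rfl
    · exact this.2

-- main induction: A's dedup of the enumerated pair list equals B's loop
lemma pvMain (l : List Int) (s : Int) (st : List (List Int) × PySem.Set (Int × Int))
    (hinv : pvInv st) :
    pvDedup st.1 ((pvPairsGen (PySem.List.enumerate l s)).map
      (fun p => PySem.List.sorted p (fun v => v) false)) = (pvAltLoop l st).1 := by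
  induction l generalizing s st with
  | nil => rfl
  | cons x t ih =>
    rw [pvPairsGen_cons, List.map_append, pvDedup_append]
    have hrow0 :
        ((PySem.List.enumerate t (s + 1)).map (fun jy => [x, jy.2])).map
          (fun p => PySem.List.sorted p (fun v => v) false) =
        t.map (pvSp x) := by
      rw [List.map_map]
      have h2 : ((PySem.List.enumerate t (s+1)).map (fun q => q.2)).map (pvSp x) = t.map (pvSp x) := by
        rw [PySem.List.map_snd_enumerate]
      rw [← h2, List.map_map]
      exact List.map_congr_left (fun p _ => pvSorted_pair x p.2)
    rw [hrow0]
    have hrest :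
        ((PySem.List.enumerate t (s + 1)).flatMap (fun ix =>
          [ix.2, x] :: (PySem.List.enumerate t (s + 1)).flatMap (fun jy =>
            if ix.1 ≠ jy.1 then [[ix.2, jy.2]] else []))).map
          (fun p => PySem.List.sorted p (fun v => v) false) =
        (PySem.List.enumerate t (s + 1)).flatMap (fun ix =>
          pvSp x ix.2 :: ((PySem.List.enumerate t (s + 1)).flatMap (fun jy =>
            if ix.1 ≠ jy.1 then [[ix.2, jy.2]] else [])).map
              (fun p => PySem.List.sorted p (fun v => v) false)) := by
      rw [List.map_flatMap]
      apply List.flatMap_congr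
      intro ix _
      simp only [List.map_cons]
      rw [pvSorted_pair, pvSp_comm]
    rw [hrest]
    rw [pvDedup_skip _ _ _ _ (by
      intro e he
      apply pvMem_dedup_of_mem
      rcases (PySem.List.mem_enumerate_iff _ _ _).mp he with ⟨k, hk, rfl⟩
      exact List.mem_map.mpr ⟨t[k], by simp, rfl⟩)]
    rw [← List.map_flatMap]
    have hB := pvAltInner_spec x t st hinv
    show pvDedup (pvDedup st.1 (t.map (pvSp x))) ((pvPairsGen (PySem.List.enumerate t (s+1))).map _) =
      (pvAltLoop t (pvAltInner x t st)).1
    rw [← hB.1]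
    exact ih (s + 1) (pvAltInner x t st) hB.2

-- ===== VERDICT (by name: the statement is the Claim_ definition above) =====
theorem get_upper_triangle_spec : Claim_equal_get_upper_triangle := by
  intro list _
  show get_upper_triangle list = get_upper_triangle_alt list
  have h := pvMain list 0 ([], PySem.Set.empty) (by intro p; simp [PySem.Set.empty])
  unfold get_upper_triangle get_upper_triangle_alt
  rw [← h]
  unfold pvDedup pvPairsGen
  rw [List.foldl_map]
  rfl
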